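-- pv_equiv track=rewrite | github.com/linkeLi0421/auto-bug-migration | script/fuzzbench_triage_report.py | detect_time_mode
-- ===== SOURCE A (Python) =====
-- def detect_time_mode(rows: list[dict]) -> str:
--     values = [
--         value
--         for row in rows
--         for value in (row["time_first_reached"], row["time_first_triggered"])
--         if value is not None
--     ]
--     if values and max(values) < 1_000_000_000:
--         return "relative"
--     return "epoch"
-- ===== SOURCE B (Python) =====
-- def detect_time_mode(rows: list[dict]) -> str:
--     seen = False
--     for row in rows:
--         for value in (row["time_first_reached"], row["time_first_triggered"]):
--             if value is None:
--                 continue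
--             if value >= 1_000_000_000:
--                 return "epoch"
--             seen = True
--     return "relative" if seen else "epoch"
-- ===== Notes on version B (the rewrite author's own statement) =====
-- stated objective: simpler
-- what changed: Replaces the comprehension that materializes all non-None values plus a max() reduction with a single flag-carrying loop that short-circuits to 'epoch' on the first value >= 1e9.
import Mathlib
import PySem

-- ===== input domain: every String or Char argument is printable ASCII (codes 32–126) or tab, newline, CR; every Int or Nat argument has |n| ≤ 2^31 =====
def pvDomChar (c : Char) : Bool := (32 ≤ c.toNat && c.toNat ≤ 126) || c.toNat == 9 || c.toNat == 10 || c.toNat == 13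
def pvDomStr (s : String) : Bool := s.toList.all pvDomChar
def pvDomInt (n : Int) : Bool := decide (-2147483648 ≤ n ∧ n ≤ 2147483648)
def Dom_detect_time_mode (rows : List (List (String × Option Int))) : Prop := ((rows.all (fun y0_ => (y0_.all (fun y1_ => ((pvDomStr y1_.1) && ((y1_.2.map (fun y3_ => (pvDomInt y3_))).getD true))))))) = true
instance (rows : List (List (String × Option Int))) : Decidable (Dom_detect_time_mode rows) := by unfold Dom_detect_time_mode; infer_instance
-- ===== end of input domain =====

-- B replaces the comprehension + max() of A by one flag-carrying loop with an early 'epoch' return; objective: simpler.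

-- ===== PORT A =====
-- row["k"]: first-match lookup; '.join' conflates a missing key (KeyError, excluded by Pre_) with a stored None.
def pvField (row : List (String × Option Int)) (k : String) : Option Int :=
  (row.lookup k).join

def detect_time_mode (rows : List (List (String × Option Int))) : String :=
  let values := rows.flatMap (fun row =>
    [pvField row "time_first_reached", pvField row "time_first_triggered"].filterMap id)
  match PySem.List.max? values (fun v => v) with
  | some m => if m < 1000000000 then "relative" else "epoch"
  | none => "epoch"

-- ===== PORT B =====
-- one field step of B's inner loop: none = early 'return "epoch"', some s = updated 'seen' flag
def altStep (seen : Bool) : Option Int → Option Bool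
  | none => some seen
  | some x => if 1000000000 ≤ x then none else some true

def altLoop : List (List (String × Option Int)) → Bool → String
  | [], seen => if seen then "relative" else "epoch"
  | row :: rest, seen =>
    match altStep seen (pvField row "time_first_reached") with
    | none => "epoch"
    | some s1 =>
      match altStep s1 (pvField row "time_first_triggered") with
      | none => "epoch"
      | some s2 => altLoop rest s2

def detect_time_mode_alt (rows : List (List (String × Option Int))) : String :=
  altLoop rows false

-- ===== PRECONDITION & SPEC =====
-- Pre_ excludes exactly the rows missing one of the two keys, on which Python A raises KeyError.
def Pre_detect_time_mode (rows : List (List (String × Option Int))) : Prop :=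
  ∀ r ∈ rows, (r.lookup "time_first_reached").isSome ∧ (r.lookup "time_first_triggered").isSome
instance (rows : List (List (String × Option Int))) : Decidable (Pre_detect_time_mode rows) := by
  unfold Pre_detect_time_mode; infer_instance

def pvWitness_detect_time_mode : (List (List (String × Option Int))) :=
  [[("time_first_reached", some 5), ("time_first_triggered", none)]]

def Spec_detect_time_mode (rows : List (List (String × Option Int))) (out : String) : Prop := out = detect_time_mode_alt rows
instance (rows : List (List (String × Option Int))) (out : String) : Decidable (Spec_detect_time_mode rows out) := by unfold Spec_detect_time_mode; infer_instance

-- ===== CLAIM (what is proved, stated in full; the proofs are below) =====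
def Claim_equal_detect_time_mode : Prop := ∀ (rows : List (List (String × Option Int))), Dom_detect_time_mode rows → Pre_detect_time_mode rows → Spec_detect_time_mode rows (detect_time_mode rows)

-- ===== LEMMAS AND PROOFS =====

def pvVals (rows : List (List (String × Option Int))) : List Int :=
  rows.flatMap (fun row =>
    [pvField row "time_first_reached", pvField row "time_first_triggered"].filterMap id)

lemma altLoop_char (rows : List (List (String × Option Int))) : ∀ seen : Bool,
    altLoop rows seen =
      if (pvVals rows).all (fun v => decide (v < 1000000000)) then
        (if seen || !(pvVals rows).isEmpty then "relative" else "epoch")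
      else "epoch" := by
  induction rows with
  | nil => intro seen; simp [altLoop, pvVals]
  | cons row rest ih =>
    intro seen
    cases h1 : pvField row "time_first_reached" with
    | none =>
      cases h2 : pvField row "time_first_triggered" with
      | none => simp [altLoop, altStep, h1, h2, ih, pvVals]
      | some x =>
        by_cases hx : (1000000000 : Int) ≤ x
        · simp [altLoop, altStep, h1, h2, hx, pvVals, not_lt.mpr hx]
        · simp [altLoop, altStep, h1, h2, hx, ih, pvVals, lt_of_not_ge hx]
    | some x =>
      by_cases hx : (1000000000 : Int) ≤ x
      · simp [altLoop, altStep, h1, hx, pvVals, not_lt.mpr hx]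
      · cases h2 : pvField row "time_first_triggered" with
        | none => simp [altLoop, altStep, h1, h2, hx, ih, pvVals, lt_of_not_ge hx]
        | some y =>
          by_cases hy : (1000000000 : Int) ≤ y
          · simp [altLoop, altStep, h1, h2, hx, hy, pvVals, not_lt.mpr hy, lt_of_not_ge hx]
          · simp [altLoop, altStep, h1, h2, hx, hy, ih, pvVals, lt_of_not_ge hx, lt_of_not_ge hy]

-- ===== VERDICT (by name: the statement is the Claim_ definition above) =====
theorem detect_time_mode_spec : Claim_equal_detect_time_mode := by
  intro rows _ _
  unfold Spec_detect_time_mode detect_time_mode detect_time_mode_alt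
  rw [altLoop_char]
  show (match PySem.List.max? (pvVals rows) (fun v => v) with
        | some m => if m < 1000000000 then "relative" else "epoch"
        | none => "epoch") = _
  cases hm : PySem.List.max? (pvVals rows) (fun v => v) with
  | none =>
    have : pvVals rows = [] := (PySem.List.max?_eq_none_iff _ _).mp hm
    simp [this]
  | some m =>
    have hmem : m ∈ pvVals rows := PySem.List.max?_mem hm
    have hmax : ∀ y ∈ pvVals rows, y ≤ m := fun y hy => PySem.List.max?_isMax hm y hy
    by_cases hlt : m < 1000000000
    · have hall : (pvVals rows).all (fun v => decide (v < 1000000000)) := by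
        simp only [List.all_eq_true, decide_eq_true_eq]
        exact fun v hv => lt_of_le_of_lt (hmax v hv) hlt
      have hne : (pvVals rows) ≠ [] := by
        intro h; rw [h] at hmem; exact absurd hmem (List.not_mem_nil)
      simp [hlt, hall, hne]
    · have : ¬ (pvVals rows).all (fun v => decide (v < 1000000000)) := by
        simp only [List.all_eq_true, decide_eq_true_eq, not_forall]
        exact ⟨m, hmem, hlt⟩
      simp [hlt, this]
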